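-- pv_equiv track=rewrite | github.com/7mind/fastmail-tools | fastmail_downloader.py | text_to_quoted_html
-- ===== SOURCE A (Python) =====
-- from typing import Optional
--
-- def escape_html(text: str) -> str:
--     return (
--         text.replace("&", "&amp;")
--         .replace("<", "&lt;")
--         .replace(">", "&gt;")
--         .replace('"', "&quot;")
--     )
--
-- DEFAULT_QUOTE_LIMIT = 3
--
-- CLIPPED_NOTICE = '<div class="quote-clipped">[nested quoted text clipped]</div>'
--
-- def text_to_quoted_html(text: str, max_depth: Optional[int] = DEFAULT_QUOTE_LIMIT) -> str:
--     """Convert plain text with > quoting into nested blockquote HTML."""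
--     lines = text.split("\n")
--     result: list[str] = []
--     current_depth = 0
--     clipped = False
--
--     for line in lines:
--         # Count leading > characters
--         depth = 0
--         rest = line
--         while rest.startswith(">"):
--             depth += 1
--             rest = rest[1:]
--             if rest.startswith(" "):
--                 rest = rest[1:]
--
--         if max_depth is not None and depth > max_depth:
--             if not clipped:
--                 # Close down to max_depth, insert notice
--                 while current_depth > max_depth:
--                     result.append("</blockquote>")
--                     current_depth -= 1
--                 while current_depth < max_depth:
--                     result.append("<blockquote>")
--                     current_depth += 1
--                 result.append(CLIPPED_NOTICE)
--                 clipped = True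
--             continue
--
--         clipped = False
--
--         # Adjust nesting
--         while current_depth < depth:
--             result.append("<blockquote>")
--             current_depth += 1
--         while current_depth > depth:
--             result.append("</blockquote>")
--             current_depth -= 1
--
--         result.append(escape_html(rest))
--         result.append("<br>")
--
--     # Close remaining open blockquotes
--     while current_depth > 0:
--         result.append("</blockquote>")
--         current_depth -= 1
--
--     return "".join(result)
-- ===== SOURCE B (Python) =====
-- from typing import Optional
--
-- DEFAULT_QUOTE_LIMIT = 3
--
-- CLIPPED_NOTICE = '<div class="quote-clipped">[nested quoted text clipped]</div>'
--
-- _ESC = {"&": "&amp;", "<": "&lt;", ">": "&gt;", '"': "&quot;"}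
--
-- def escape_html(text: str) -> str:
--     return "".join(_ESC.get(c, c) for c in text)
--
-- def _parse_line(line: str):
--     """Return (quote depth, remainder) of a line: each leading '>' may eat one space."""
--     i, n, depth = 0, len(line), 0
--     while i < n and line[i] == ">":
--         depth += 1
--         i += 1
--         if i < n and line[i] == " ":
--             i += 1
--     return depth, line[i:]
--
-- def text_to_quoted_html(text: str, max_depth: Optional[int] = DEFAULT_QUOTE_LIMIT) -> str:
--     """Convert plain text with > quoting into nested blockquote HTML."""
--     # Phase 1: tokenize. None = one collapsed run of over-depth (clipped) lines;
--     # (depth, escaped_text) = a content line.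
--     tokens = []
--     clipped = False
--     for line in text.split("\n"):
--         depth, rest = _parse_line(line)
--         if max_depth is not None and depth > max_depth:
--             if not clipped:
--                 tokens.append(None)
--                 clipped = True
--         else:
--             clipped = False
--             tokens.append((depth, escape_html(rest)))
--     # Phase 2: render, adjusting the open-blockquote level per token.
--     out = []
--     cur = 0
--     for tok in tokens:
--         if tok is None:
--             target, body = max_depth, CLIPPED_NOTICE
--         else:
--             target, body = tok[0], tok[1] + "<br>"
--         if target >= cur:
--             out.append("<blockquote>" * (target - cur))
--         else:
--             out.append("</blockquote>" * (cur - target))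
--         cur = target
--         out.append(body)
--     out.append("</blockquote>" * cur)  # negative cur (max_depth < 0) multiplies to ""
--     return "".join(out)
-- ===== Notes on version B (the rewrite author's own statement) =====
-- stated objective: alternative
-- what changed: Replaced A's single fused pass (stateful while-loops appending as it scans) by a two-phase pipeline: a tokenizer producing (depth, escaped-text) / collapsed-clip tokens, then a renderer that jumps between nesting levels with string multiplication instead of unit while-loops; escaping is a single table-driven character map instead of four chained str.replace passes.
import Mathlib
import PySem

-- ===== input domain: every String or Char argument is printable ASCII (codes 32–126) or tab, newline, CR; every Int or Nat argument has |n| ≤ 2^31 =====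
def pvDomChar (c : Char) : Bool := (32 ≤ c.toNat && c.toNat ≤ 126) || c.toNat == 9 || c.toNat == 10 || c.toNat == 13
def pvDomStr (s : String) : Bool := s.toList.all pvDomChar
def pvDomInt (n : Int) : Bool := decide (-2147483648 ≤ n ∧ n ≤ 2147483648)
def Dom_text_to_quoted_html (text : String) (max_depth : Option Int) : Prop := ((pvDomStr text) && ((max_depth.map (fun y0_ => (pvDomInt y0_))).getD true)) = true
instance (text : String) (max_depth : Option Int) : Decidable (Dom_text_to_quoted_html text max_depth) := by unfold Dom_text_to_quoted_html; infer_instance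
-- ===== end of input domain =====

-- B re-decomposes A's single fused pass into a tokenize phase + render phase (alternative
-- decomposition, same cost); equivalence of return values is proved for all inputs (A is total).

-- ===== PORT A =====

-- escape_html of A: four chained str.replace passes (on char lists via PySem.Chars).
def pvEscA (s : List Char) : List Char :=
  PySem.Chars.replace
    (PySem.Chars.replace
      (PySem.Chars.replace
        (PySem.Chars.replace s ['&'] "&amp;".toList)
        ['<'] "&lt;".toList)
      ['>'] "&gt;".toList)
    ['"'] "&quot;".toList

def pvCLIPPED : List Char := "<div class=\"quote-clipped\">[nested quoted text clipped]</div>".toList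

-- A's inner while: count leading '>' (each may eat one following space).
def pvCountA (rest : List Char) (depth : Int) : Int × List Char :=
  if PySem.Chars.startswith rest ['>'] then
    pvCountA
      (if PySem.Chars.startswith (PySem.Chars.slice rest (some 1) none) [' ']
       then PySem.Chars.slice (PySem.Chars.slice rest (some 1) none) (some 1) none
       else PySem.Chars.slice rest (some 1) none)
      (depth + 1)
  else (depth, rest)
termination_by rest.length
decreasing_by
  rcases rest with _ | ⟨c, t⟩
  · simp [PySem.Chars.startswith] at *
  · simp [PySem.Chars.slice_eq_listSlice, PySem.List.slice_from_one]
    split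
    · cases t <;> simp
    · omega

-- A's "while current_depth > target: append '</blockquote>'" loop.
def pvCloseA (res : List (List Char)) (cur target : Int) : List (List Char) × Int :=
  if target < cur then pvCloseA (res ++ ["</blockquote>".toList]) (cur - 1) target
  else (res, cur)
termination_by (cur - target).toNat
decreasing_by omega

-- A's "while current_depth < target: append '<blockquote>'" loop.
def pvOpenA (res : List (List Char)) (cur target : Int) : List (List Char) × Int :=
  if cur < target then pvOpenA (res ++ ["<blockquote>".toList]) (cur + 1) target
  else (res, cur)
termination_by (target - cur).toNat
decreasing_by omega

-- A's main for-loop over the lines, state = (result, current_depth, clipped).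
def pvLoopA (md : Option Int) : List (List Char) → List (List Char) × Int × Bool → List (List Char) × Int × Bool
  | [], st => st
  | line :: rest, (res, cur, clipped) =>
    let dr := pvCountA line 0
    if (match md with | some m => decide (m < dr.1) | none => false) then
      if clipped then pvLoopA md rest (res, cur, clipped)
      else
        let c1 := pvCloseA res cur (md.getD 0)      -- md is some here; getD never takes its default
        let o1 := pvOpenA c1.1 c1.2 (md.getD 0)
        pvLoopA md rest (o1.1 ++ [pvCLIPPED], o1.2, true)
    else
      let o1 := pvOpenA res cur dr.1
      let c1 := pvCloseA o1.1 o1.2 dr.1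
      pvLoopA md rest (c1.1 ++ [pvEscA dr.2, "<br>".toList], c1.2, false)

def text_to_quoted_html (text : String) (max_depth : Option Int) : String :=
  let lines := PySem.Chars.splitOn text.toList ['\n']
  let st := pvLoopA max_depth lines ([], 0, false)
  let fin := pvCloseA st.1 st.2.1 0
  String.ofList (PySem.Chars.join [] fin.1)

-- ===== PORT B =====

-- Source B's _ESC replacement table (a dict) and table-driven escape_html.
def pvEscTableB : PySem.Dict Char (List Char) :=
  ⟨[('&', "&amp;".toList), ('<', "&lt;".toList), ('>', "&gt;".toList), ('"', "&quot;".toList)]⟩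

def pvEscB (s : List Char) : List Char :=
  PySem.Chars.join [] (s.map (fun c => PySem.Dict.getD pvEscTableB c [c]))

-- Source B's index-based scan of _parse_line, ported as the equivalent front-consuming recursion
-- (exact: the same characters are examined in the same order).
def pvParseB : List Char → Int × List Char
  | [] => (0, [])
  | c :: t =>
    if c = '>' then
      let t' := if t.head? = some ' ' then t.tail else t
      ((pvParseB t').1 + 1, (pvParseB t').2)
    else (0, c :: t)
termination_by l => l.length
decreasing_by split <;> cases t <;> simp

-- Python's  s * n  on strings (exact: a negative count yields "").
def pvRepB (s : List Char) (n : Int) : List Char := (List.replicate n.toNat s).flatten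

-- Phase 1: token list; none = one collapsed clip run, some (depth, escaped text) = content line.
def pvTokB (md : Option Int) (clipped : Bool) : List (List Char) → List (Option (Int × List Char)) × Bool
  | [] => ([], clipped)
  | line :: rest =>
    let dr := pvParseB line
    if (match md with | some m => decide (m < dr.1) | none => false) then
      if clipped then pvTokB md clipped rest
      else
        let ts := pvTokB md true rest
        (none :: ts.1, ts.2)
    else
      let ts := pvTokB md false rest
      (some (dr.1, pvEscB dr.2) :: ts.1, ts.2)

-- Phase 2: render, jumping between nesting levels with string multiplication.
def pvRenderB (md : Option Int) : List (Option (Int × List Char)) → List (List Char) → Int → List (List Char) × Int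
  | [], out, cur => (out, cur)
  | tok :: ts, out, cur =>
    let tb : Int × List Char :=
      match tok with
      | none => (md.getD 0, pvCLIPPED)   -- clip tokens exist only when md is some; default unused
      | some (d, esc) => (d, esc ++ "<br>".toList)
    let adj := if cur ≤ tb.1 then pvRepB "<blockquote>".toList (tb.1 - cur)
               else pvRepB "</blockquote>".toList (cur - tb.1)
    pvRenderB md ts (out ++ [adj, tb.2]) tb.1

def text_to_quoted_html_alt (text : String) (max_depth : Option Int) : String :=
  let lines := PySem.Chars.splitOn text.toList ['\n']
  let toks := pvTokB max_depth false lines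
  let oc := pvRenderB max_depth toks.1 [] 0
  String.ofList (PySem.Chars.join [] (oc.1 ++ [pvRepB "</blockquote>".toList oc.2]))

-- ===== PRECONDITION & SPEC =====
def Spec_text_to_quoted_html (text : String) (max_depth : Option Int) (out : String) : Prop := out = text_to_quoted_html_alt text max_depth
instance (text : String) (max_depth : Option Int) (out : String) : Decidable (Spec_text_to_quoted_html text max_depth out) := by unfold Spec_text_to_quoted_html; infer_instance

-- ===== CLAIM (what is proved, stated in full; the proofs are below) =====
def Claim_equal_text_to_quoted_html : Prop := ∀ (text : String) (max_depth : Option Int), Dom_text_to_quoted_html text max_depth → Spec_text_to_quoted_html text max_depth (text_to_quoted_html text max_depth)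

-- ===== LEMMAS AND PROOFS =====

theorem pv_join_nil (parts : List (List Char)) : PySem.Chars.join [] parts = parts.flatten := by
  simp only [PySem.Chars.join, List.intercalate]
  induction parts with
  | nil => simp
  | cons a t ih =>
    cases t <;> simp_all [List.intersperse]

-- str.replace's worker with a one-character pattern, characterised.
theorem pv_replace_go (a : Char) (new : List Char) (fuel : Nat) :
    ∀ (l : List Char) (acc : List Char), l.length ≤ fuel →
    PySem.Chars.replace.go [a] new fuel l acc
      = acc.reverse ++ l.flatMap (fun c => if c = a then new else [c]) := by
  induction fuel with
  | zero =>
    intro l acc h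
    have : l = [] := by cases l <;> simp_all
    subst this; simp [PySem.Chars.replace.go]
  | succ n ih =>
    intro l acc h
    cases l with
    | nil => simp [PySem.Chars.replace.go]
    | cons c t =>
      simp only [PySem.Chars.replace.go]
      by_cases hc : c = a
      · subst hc
        rw [if_pos (by simp [List.isPrefixOf])]
        rw [ih _ _ (by simpa using Nat.le_of_succ_le_succ h)]
        simp
      · rw [if_neg (by simp [List.isPrefixOf]; exact fun hh => (hc hh.symm).elim)]
        rw [ih _ _ (by simpa using Nat.le_of_succ_le_succ h)]
        simp [hc]

-- str.replace with a one-character pattern is a per-character flatMap.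
theorem pv_replace_single (a : Char) (new : List Char) (cs : List Char) :
    PySem.Chars.replace cs [a] new = cs.flatMap (fun c => if c = a then new else [c]) := by
  simp [PySem.Chars.replace, pv_replace_go a new cs.length cs [] le_rfl]

-- one character through the four replace passes = one table lookup
theorem pv_esc_char (c : Char) :
    (((if c = '&' then "&amp;".toList else [c]).flatMap
        (fun b => if b = '<' then "&lt;".toList else [b])).flatMap
          (fun b => if b = '>' then "&gt;".toList else [b])).flatMap
            (fun b => if b = '"' then "&quot;".toList else [b])
      = PySem.Dict.getD pvEscTableB c [c] := by
  by_cases h1 : c = '&'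
  · subst h1; decide
  by_cases h2 : c = '<'
  · subst h2; decide
  by_cases h3 : c = '>'
  · subst h3; decide
  by_cases h4 : c = '"'
  · subst h4; decide
  have e1 : ('&' == c) = false := by simp [Ne.symm h1]
  have e2 : ('<' == c) = false := by simp [Ne.symm h2]
  have e3 : ('>' == c) = false := by simp [Ne.symm h3]
  have e4 : ('"' == c) = false := by simp [Ne.symm h4]
  simp [h1, h2, h3, h4, e1, e2, e3, e4, PySem.Dict.getD, PySem.Dict.get?, pvEscTableB, List.find?]

theorem pv_esc_eq (s : List Char) : pvEscA s = pvEscB s := by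
  unfold pvEscA pvEscB
  rw [pv_join_nil]
  simp only [pv_replace_single, List.flatMap_assoc]
  induction s with
  | nil => simp
  | cons c t ih =>
    simp only [List.flatMap_cons, List.map_cons, List.flatten_cons, ih]
    rw [← pv_esc_char c]
    simp only [List.flatMap_assoc]

theorem pv_count_eq (l : List Char) : ∀ d : Int, pvCountA l d = ((pvParseB l).1 + d, (pvParseB l).2) := by
  induction l using pvParseB.induct with
  | case1 => intro d; simp [pvCountA, pvParseB, PySem.Chars.startswith]
  | case2 t t' ih =>
    intro d
    rw [pvCountA]
    rw [if_pos (by simp [PySem.Chars.startswith, List.isPrefixOf])]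
    have hs : (if PySem.Chars.startswith (PySem.Chars.slice ('>' :: t) (some 1) none) [' ']
       then PySem.Chars.slice (PySem.Chars.slice ('>' :: t) (some 1) none) (some 1) none
       else PySem.Chars.slice ('>' :: t) (some 1) none)
       = (if t.head? = some ' ' then t.tail else t) := by
      simp only [PySem.Chars.slice_eq_listSlice, PySem.List.slice_from_one, List.tail_cons]
      cases t with
      | nil => simp [PySem.Chars.startswith]
      | cons h r =>
        by_cases hh : h = ' '
        · simp [PySem.Chars.startswith, List.isPrefixOf, hh]
        · simp [PySem.Chars.startswith, List.isPrefixOf, hh, Ne.symm hh]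
    rw [hs, show (if t.head? = some ' ' then t.tail else t) = t' from rfl, ih]
    simp only [pvParseB]
    rw [show (if t.head? = some ' ' then t.tail else t) = t' from rfl]
    simp [Prod.ext_iff]
    omega
  | case3 c t hc =>
    intro d
    rw [pvCountA]
    rw [if_neg (by simp [PySem.Chars.startswith, List.isPrefixOf]; exact fun hh => (hc hh.symm).elim)]
    simp [pvParseB, hc]

theorem pv_close_eq (target : Int) (res : List (List Char)) (cur : Int) :
    pvCloseA res cur target =
      (res ++ List.replicate (cur - target).toNat "</blockquote>".toList, min cur target) := by
  induction res, cur using pvCloseA.induct (target := target) with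
  | case1 res cur h ih =>
    rw [pvCloseA, if_pos h, ih, Prod.mk.injEq]
    have h2 : (cur - target).toNat = (cur - 1 - target).toNat + 1 := by omega
    constructor
    · simp [h2, List.replicate_succ]
    · omega
  | case2 res cur h =>
    rw [pvCloseA, if_neg h]
    have : (cur - target).toNat = 0 := by omega
    simp [this]; omega

theorem pv_open_eq (target : Int) (res : List (List Char)) (cur : Int) :
    pvOpenA res cur target =
      (res ++ List.replicate (target - cur).toNat "<blockquote>".toList, max cur target) := by
  induction res, cur using pvOpenA.induct (target := target) with
  | case1 res cur h ih =>
    rw [pvOpenA, if_pos h, ih, Prod.mk.injEq]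
    have h2 : (target - cur).toNat = (target - (cur + 1)).toNat + 1 := by omega
    constructor
    · simp [h2, List.replicate_succ]
    · omega
  | case2 res cur h =>
    rw [pvOpenA, if_neg h]
    have : (target - cur).toNat = 0 := by omega
    simp [this]; omega

theorem pv_render_acc (md : Option Int) (ts : List (Option (Int × List Char))) :
    ∀ (out : List (List Char)) (cur : Int),
    pvRenderB md ts out cur = (out ++ (pvRenderB md ts [] cur).1, (pvRenderB md ts [] cur).2) := by
  induction ts with
  | nil => intro out cur; simp [pvRenderB]
  | cons tok ts ih =>
    intro out cur
    simp only [pvRenderB]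
    rw [ih _ _, ih ([] ++ _) _]
    simp

-- A's open-then-close adjust (content line) flattens to B's one multiplied piece.
theorem pv_adj_content (cur target : Int) :
    (List.replicate (target - cur).toNat "<blockquote>".toList).flatten
      ++ (List.replicate (max cur target - target).toNat "</blockquote>".toList).flatten
    = (if cur ≤ target then pvRepB "<blockquote>".toList (target - cur)
       else pvRepB "</blockquote>".toList (cur - target)) := by
  by_cases h : cur ≤ target
  · simp [h, pvRepB]
  · have h1 : (target - cur).toNat = 0 := by omega
    have h2 : max cur target = cur := by omega
    simp [h, h1, h2, pvRepB]

-- A's close-then-open adjust (clip notice) flattens to B's one multiplied piece.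
theorem pv_adj_clip (cur target : Int) :
    (List.replicate (cur - target).toNat "</blockquote>".toList).flatten
      ++ (List.replicate (target - min cur target).toNat "<blockquote>".toList).flatten
    = (if cur ≤ target then pvRepB "<blockquote>".toList (target - cur)
       else pvRepB "</blockquote>".toList (cur - target)) := by
  by_cases h : cur ≤ target
  · have h1 : (cur - target).toNat = 0 := by omega
    simp [h, h1, pvRepB]
  · have h1 : (target - min cur target).toNat = 0 := by omega
    simp [h, h1, pvRepB]

theorem pv_loop_eq (md : Option Int) (lines : List (List Char)) :
    ∀ (res : List (List Char)) (cur : Int) (clipped : Bool),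
    (pvLoopA md lines (res, cur, clipped)).1.flatten
        = res.flatten ++ (pvRenderB md (pvTokB md clipped lines).1 [] cur).1.flatten
      ∧ (pvLoopA md lines (res, cur, clipped)).2.1
        = (pvRenderB md (pvTokB md clipped lines).1 [] cur).2 := by
  induction lines with
  | nil => intro res cur clipped; simp [pvLoopA, pvTokB, pvRenderB]
  | cons line rest ih =>
    intro res cur clipped
    simp only [pvLoopA, pvTokB, pv_count_eq line 0, add_zero]
    cases md with
    | none =>
      -- content step
      simp only [Bool.false_eq_true, if_false]
      rw [pv_open_eq, pv_close_eq]
      simp only [pvRenderB]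
      rw [pv_render_acc _ _ ([] ++ _)]
      obtain ⟨ihl, ihr⟩ := ih (_ ++ [pvEscA (pvParseB line).2, "<br>".toList])
        (min (max cur (pvParseB line).1) (pvParseB line).1) false
      rw [ihl, ihr]
      have hmin : min (max cur (pvParseB line).1) (pvParseB line).1 = (pvParseB line).1 := by omega
      rw [hmin]
      simp only [List.append_assoc, List.flatten_append, List.flatten_cons, List.flatten_nil,
        List.append_nil, List.nil_append]
      rw [← List.append_assoc ((List.replicate _ _).flatten), pv_adj_content, pv_esc_eq]
      simp
    | some m =>
      by_cases hc : m < (pvParseB line).1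
      · have hd : decide (m < (pvParseB line).1) = true := by simp [hc]
        simp only [hd, if_true]
        cases clipped with
        | true =>
          simp only [if_true]
          exact ih res cur true
        | false =>
          simp only [Bool.false_eq_true, if_false, Option.getD_some]
          rw [pv_close_eq, pv_open_eq]
          simp only [pvRenderB, Option.getD_some]
          rw [pv_render_acc _ _ ([] ++ _)]
          obtain ⟨ihl, ihr⟩ := ih (_ ++ [pvCLIPPED]) (max (min cur m) m) true
          rw [ihl, ihr]
          have hmax : max (min cur m) m = m := by omega
          rw [hmax]
          simp only [List.append_assoc, List.flatten_append, List.flatten_cons, List.flatten_nil,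
            List.append_nil, List.nil_append]
          rw [← List.append_assoc ((List.replicate _ _).flatten), pv_adj_clip]
          simp
      · have hd : decide (m < (pvParseB line).1) = false := by simp [hc]
        simp only [hd, Bool.false_eq_true, if_false]
        rw [pv_open_eq, pv_close_eq]
        simp only [pvRenderB]
        rw [pv_render_acc _ _ ([] ++ _)]
        obtain ⟨ihl, ihr⟩ := ih (_ ++ [pvEscA (pvParseB line).2, "<br>".toList])
          (min (max cur (pvParseB line).1) (pvParseB line).1) false
        rw [ihl, ihr]
        have hmin : min (max cur (pvParseB line).1) (pvParseB line).1 = (pvParseB line).1 := by omega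
        rw [hmin]
        simp only [List.append_assoc, List.flatten_append, List.flatten_cons, List.flatten_nil,
          List.append_nil, List.nil_append]
        rw [← List.append_assoc ((List.replicate _ _).flatten), pv_adj_content, pv_esc_eq]
        simp

-- ===== VERDICT (by name: the statement is the Claim_ definition above) =====
theorem text_to_quoted_html_spec : Claim_equal_text_to_quoted_html := by
  intro text md _
  unfold Spec_text_to_quoted_html text_to_quoted_html text_to_quoted_html_alt
  simp only [pv_join_nil]
  obtain ⟨hl, hr⟩ := pv_loop_eq md (PySem.Chars.splitOn text.toList ['\n']) [] 0 false
  rw [pv_close_eq]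
  simp only [List.flatten_append, List.flatten_cons, List.flatten_nil, List.append_nil]
  rw [hl, hr]
  simp [pvRepB]
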